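-- pv_equiv track=rewrite | github.com/mintkw/dl-dpm-dissertation | seq2stages.py | seq2stages
-- ===== SOURCE A (Python) =====
-- def seq2stages(seq):
--     # SEQ is in PO format i.e. list ofl ists
--     seq_vec = [item for sublist in seq for item in sublist]
--     n_biomarkers = len(seq_vec)
--     n_stages = len(seq)+1
--     stages = [[0] * n_biomarkers] + [[0]*n_biomarkers for _ in range(n_stages-1)]
--     for i in range(1,n_stages):
--         event_inds_stage_i = seq[i-1]
--         for event_ind in event_inds_stage_i:
--             for k in range(i,n_stages):
--                 stages[k][event_ind] = 1
--     return stages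
-- ===== SOURCE B (Python) =====
-- def seq2stages(seq):
--     # Cumulative single pass: each stage row = previous row plus that stage's events.
--     n_biomarkers = sum(len(events) for events in seq)
--     row = [0] * n_biomarkers
--     stages = [row]
--     for events in seq:
--         row = row.copy()
--         for e in events:
--             row[e] = 1
--         stages.append(row)
--     return stages
-- ===== Notes on version B (the rewrite author's own statement) =====
-- stated objective: alternative
-- what changed: Replaces A's triple loop (each event scattered forward into every later stage row, over a pre-built zero matrix) with a single cumulative pass that derives each stage row by copying the previous row and marking only that stage's events.
import Mathlib
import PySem

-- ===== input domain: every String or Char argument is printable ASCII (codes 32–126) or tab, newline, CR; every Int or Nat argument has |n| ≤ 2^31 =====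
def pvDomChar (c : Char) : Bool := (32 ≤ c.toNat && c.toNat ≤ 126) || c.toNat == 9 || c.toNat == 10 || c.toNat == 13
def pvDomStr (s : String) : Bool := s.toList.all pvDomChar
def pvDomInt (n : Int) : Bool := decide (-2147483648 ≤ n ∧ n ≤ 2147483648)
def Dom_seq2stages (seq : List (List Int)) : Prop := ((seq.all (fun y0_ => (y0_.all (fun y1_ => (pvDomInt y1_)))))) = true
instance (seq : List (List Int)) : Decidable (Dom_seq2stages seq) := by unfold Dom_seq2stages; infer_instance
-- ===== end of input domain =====

-- B replaces A's forward triple-loop scatter with one cumulative pass (each stage row = copy of the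
-- previous row with that stage's events marked); return values proved equal wherever Python A returns.

-- ===== PORT A =====
-- A: flatten seq, pre-build an (S+1) x n zero matrix, then for each stage i and each of its events
-- write 1 into that event's column of every row k >= i.
def seq2stages (seq : List (List Int)) : List (List Int) :=
  let seq_vec : List Int := seq.flatten
  let n_biomarkers : Nat := seq_vec.length
  let n_stages : Int := (seq.length : Int) + 1
  let stages : List (List Int) :=
    List.replicate n_biomarkers (0 : Int) ::
      (PySem.List.pyRange 0 (n_stages - 1) 1).map (fun _ => List.replicate n_biomarkers (0 : Int))
  (PySem.List.pyRange 1 n_stages 1).foldl (fun st i =>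
    let event_inds_stage_i := PySem.List.pyGetD seq (i - 1) []
    event_inds_stage_i.foldl (fun st event_ind =>
      (PySem.List.pyRange i n_stages 1).foldl (fun st k =>
        st.modify k.toNat (fun row => PySem.List.pySetD row event_ind 1)) st) st) stages

-- ===== PORT B =====
-- B-side helper: row with every event of `events` marked (row[e] = 1 for e in events).
def markRow (row : List Int) (events : List Int) : List Int :=
  events.foldl (fun r e => PySem.List.pySetD r e 1) row

-- B-side helper: the loop of Source B — emit the current row, then recurse with the updated copy.
def altRows (row : List Int) : List (List Int) → List (List Int)
  | [] => [row]
  | events :: rest => row :: altRows (markRow row events) rest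

def seq2stages_alt (seq : List (List Int)) : List (List Int) :=
  let n_biomarkers : Nat := (seq.map List.length).sum
  altRows (List.replicate n_biomarkers (0 : Int)) seq

-- ===== PRECONDITION & SPEC =====
-- Pre_ excludes exactly the inputs on which Python A raises IndexError: some event index outside
-- [-n, n) for n the total number of events (Python B raises IndexError on the same inputs).
def Pre_seq2stages (seq : List (List Int)) : Prop :=
  ∀ e ∈ seq.flatten, PySem.Raise.InRange seq.flatten.length e
instance (seq : List (List Int)) : Decidable (Pre_seq2stages seq) := by
  unfold Pre_seq2stages; infer_instance

def pvWitness_seq2stages : List (List Int) := [[2, 0], [1]]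

def Spec_seq2stages (seq : List (List Int)) (out : List (List Int)) : Prop := out = seq2stages_alt seq
instance (seq : List (List Int)) (out : List (List Int)) : Decidable (Spec_seq2stages seq out) := by unfold Spec_seq2stages; infer_instance

-- ===== CLAIM (what is proved, stated in full; the proofs are below) =====
def Claim_equal_seq2stages : Prop := ∀ (seq : List (List Int)), Dom_seq2stages seq → Pre_seq2stages seq → Spec_seq2stages seq (seq2stages seq)

-- ===== LEMMAS AND PROOFS =====
theorem foldl_modify_range (f : List Int → List Int) :
    ∀ (n : Nat) (st : List (List Int)) (i : Int), 0 ≤ i → st.length ≤ i.toNat + n →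
      (PySem.List.pyRange i (st.length : Int) 1).foldl
          (fun s k => s.modify k.toNat f) st
        = st.take i.toNat ++ (st.drop i.toNat).map f := by
  intro n
  induction n with
  | zero =>
    intro st i hi hn
    rw [PySem.List.pyRange_one_eq_nil (by omega)]
    have h1 : st.length ≤ i.toNat := by omega
    simp [List.take_of_length_le h1, List.drop_eq_nil_of_le h1]
  | succ n ih =>
    intro st i hi hn
    by_cases hlt : i < (st.length : Int)
    case neg =>
      rw [PySem.List.pyRange_one_eq_nil (by omega)]
      have h1 : st.length ≤ i.toNat := by omega
      simp [List.take_of_length_le h1, List.drop_eq_nil_of_le h1]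
    case pos =>
      rw [PySem.List.pyRange_one_cons hlt]
      simp only [List.foldl_cons]
      have hlen : (st.modify i.toNat f).length = st.length := List.length_modify ..
      have := ih (st.modify i.toNat f) (i + 1) (by omega) (by omega)
      rw [hlen] at this
      rw [this]
      have hilt : i.toNat < st.length := by omega
      have hmod := List.modify_eq_take_cons_drop (l:=st) (f:=f) hilt
      have hT : (i+1).toNat = i.toNat + 1 := by omega
      rw [hT, hmod]
      rw [List.take_append, List.drop_append]
      simp [List.length_take, List.take_of_length_le,
            List.drop_eq_nil_of_le, Nat.le_of_lt hilt]
      rw [List.drop_eq_getElem_cons (l := List.map f st) (i := i.toNat) (by simpa using hilt)]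
      simp

theorem take_suffix_map (st : List (List Int)) (t : Nat) (g : List Int → List Int) :
    (st.take t ++ (st.drop t).map g).take t = st.take t := by
  by_cases h : t ≤ st.length
  · exact List.take_left' (by simp [List.length_take, min_eq_left h])
  · simp [List.take_of_length_le (le_of_lt (not_le.mp h)),
          List.drop_eq_nil_of_le (le_of_lt (not_le.mp h))]

theorem drop_suffix_map (st : List (List Int)) (t : Nat) (g : List Int → List Int) :
    (st.take t ++ (st.drop t).map g).drop t = (st.drop t).map g := by
  by_cases h : t ≤ st.length
  · exact List.drop_left' (by simp [List.length_take, min_eq_left h])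
  · simp [List.drop_eq_nil_of_le (le_of_lt (not_le.mp h)),
          List.take_of_length_le (le_of_lt (not_le.mp h))]

theorem length_suffix_map (st : List (List Int)) (t : Nat) (g : List Int → List Int) :
    (st.take t ++ (st.drop t).map g).length = st.length := by
  simp [List.length_take, List.length_drop]; omega

-- one outer stage of A: all its events written into every row from index i on
theorem stage_fold (M : Nat) :
    ∀ (es : List Int) (st : List (List Int)), st.length = M → ∀ i : Int, 0 ≤ i →
      es.foldl (fun s e =>
          (PySem.List.pyRange i (M : Int) 1).foldl
            (fun s k => s.modify k.toNat (fun r => PySem.List.pySetD r e 1)) s) st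
        = st.take i.toNat ++ (st.drop i.toNat).map (fun r => markRow r es) := by
  intro es
  induction es with
  | nil => intro st hM i hi; simp [markRow]
  | cons e es ih =>
    intro st hM i hi
    simp only [List.foldl_cons]
    have h1 : (PySem.List.pyRange i (M : Int) 1).foldl
        (fun s k => s.modify k.toNat (fun r => PySem.List.pySetD r e 1)) st
        = st.take i.toNat ++ (st.drop i.toNat).map (fun r => PySem.List.pySetD r e 1) := by
      rw [← hM]
      exact foldl_modify_range _ st.length st i hi (by omega)
    rw [h1, ih _ (by rw [length_suffix_map, hM]) i hi,
        take_suffix_map, drop_suffix_map, List.map_map]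
    simp only [markRow, List.foldl_cons, Function.comp_def]

theorem markRow_append (r a b : List Int) :
    markRow r (a ++ b) = markRow (markRow r a) b := by
  simp [markRow, List.foldl_append]

theorem altRows_char (l : List (List Int)) :
    ∀ z : List Int,
    altRows z l = (List.range (l.length + 1)).map (fun k => markRow z (l.take k).flatten) := by
  induction l with
  | nil => intro z; simp [altRows, markRow]
  | cons es rest ih =>
    intro z
    rw [altRows, ih (markRow z es)]
    rw [show (es :: rest).length + 1 = (rest.length + 1) + 1 by simp]
    conv_rhs => rw [List.range_succ_eq_map]
    simp only [List.map_cons, List.map_map]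
    refine congrArg₂ List.cons ?_ ?_
    · simp [markRow]
    · apply List.map_congr_left
      intro k hk
      simp only [Function.comp_def, Nat.succ_eq_add_one, List.take_succ_cons, List.flatten_cons]
      rw [markRow_append]

theorem A_outer_char (seq : List (List Int)) (z : List Int) :
    ∀ m : Nat, m ≤ seq.length →
    ((List.range m).map (fun j : Nat => (1 : Int) + (j : Int))).foldl
        (fun st i =>
          let event_inds_stage_i := PySem.List.pyGetD seq (i - 1) []
          event_inds_stage_i.foldl (fun st e =>
            (PySem.List.pyRange i ((seq.length : Int) + 1) 1).foldl
              (fun st k => st.modify k.toNat (fun row => PySem.List.pySetD row e 1)) st) st)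
        ((List.range (seq.length + 1)).map (fun _ => z))
      = (List.range (seq.length + 1)).map
          (fun k => markRow z ((seq.take (min k m)).flatten)) := by
  intro m
  induction m with
  | zero =>
    intro _
    simp [markRow]
  | succ m ih =>
    intro hm
    rw [show List.range (m+1) = List.range m ++ [m] from List.range_succ, List.map_append,
        List.foldl_append, ih (by omega)]
    simp only [List.map_cons, List.map_nil, List.foldl_cons, List.foldl_nil]
    have hmS : m < seq.length := by omega
    have hget : PySem.List.pyGetD seq ((1 : Int) + (m : Int) - 1) [] = seq[m] := by
      rw [show (1 : Int) + (m : Int) - 1 = ((m : Nat) : Int) by omega]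
      simp [List.getD_eq_getElem?_getD, List.getElem?_eq_getElem hmS]
    rw [hget]
    have hlen : ((List.range (seq.length + 1)).map
        (fun k => markRow z ((seq.take (min k m)).flatten))).length = seq.length + 1 := by simp
    have hcast : ((seq.length : Int) + 1) = (((seq.length + 1 : Nat)) : Int) := by push_cast; ring
    rw [hcast, stage_fold (seq.length + 1) seq[m] _ hlen (1 + (m : Int)) (by omega)]
    have ht : ((1 : Int) + (m : Int)).toNat = m + 1 := by omega
    rw [ht]
    apply List.ext_getElem
    · simp only [List.length_append, List.length_take, List.length_map, List.length_drop,
        List.length_range]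
      omega
    · intro j hj1 hj2
      simp only [List.length_append, List.length_take, List.length_map, List.length_drop,
        List.length_range] at hj1
      rw [List.getElem_append]
      split
      case isTrue h =>
        rw [List.getElem_take, List.getElem_map, List.getElem_range]
        simp only [List.length_take, List.length_map, List.length_range] at h
        rw [min_eq_left (by omega : m + 1 ≤ seq.length + 1)] at h
        rw [List.getElem_map, List.getElem_range]
        rw [show min j m = min j (m + 1) by omega]
      case isFalse h =>
        simp only [List.length_take, List.length_map, List.length_range] at h
        rw [min_eq_left (by omega : m + 1 ≤ seq.length + 1)] at h
        rw [List.getElem_map, List.getElem_drop, List.getElem_map, List.getElem_range,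
            List.getElem_map, List.getElem_range]
        simp only [List.length_take, List.length_map, List.length_range]
        rw [show min (m + 1) (seq.length + 1) = m + 1 by omega]
        rw [show min (m + 1 + (j - (m + 1))) m = m by omega]
        rw [show min j (m + 1) = m + 1 by omega]
        rw [List.take_add_one, List.getElem?_eq_getElem hmS]
        rw [List.flatten_append, markRow_append]
        simp [markRow]
theorem seq2stages_eq_alt (seq : List (List Int)) : seq2stages seq = seq2stages_alt seq := by
  simp only [seq2stages, seq2stages_alt]
  rw [show (seq.map List.length).sum = seq.flatten.length from List.length_flatten.symm]
  rw [show ((seq.length : Int) + 1 - 1) = (seq.length : Int) by ring]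
  rw [PySem.List.pyRange_one 1 ((seq.length : Int) + 1)]
  rw [show ((seq.length : Int) + 1 - 1).toNat = seq.length by omega]
  have hinit : List.replicate seq.flatten.length (0 : Int) ::
      (PySem.List.pyRange 0 (seq.length : Int) 1).map
        (fun _ => List.replicate seq.flatten.length (0 : Int))
      = (List.range (seq.length + 1)).map (fun _ => List.replicate seq.flatten.length (0 : Int)) := by
    rw [List.map_const', List.map_const']
    simp [List.replicate_succ]
  rw [hinit]
  rw [A_outer_char seq (List.replicate seq.flatten.length (0 : Int)) seq.length (le_refl _)]
  rw [altRows_char]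
  apply List.map_congr_left
  intro k hk
  rw [min_eq_left (by simpa using Nat.lt_succ_iff.mp (List.mem_range.mp hk))]

-- ===== VERDICT (by name: the statement is the Claim_ definition above) =====
theorem seq2stages_spec : Claim_equal_seq2stages := by
  intro seq _ _
  show seq2stages seq = seq2stages_alt seq
  exact seq2stages_eq_alt seq
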